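-- pv_equiv track=rewrite | github.com/NeatRaptor/windmill-digital-twin | src/rca_subsystem_mapper.py | map_sensors_to_subsystems
-- ===== SOURCE A (Python) =====
-- from typing import List
--
-- def map_sensors_to_subsystems(
--     sensor_list: List[str],
--     sensor_map: dict
-- ):
--     """
--     Converts:
--         ['sensor_12', 'sensor_87']
--     Into:
--         ['GEARBOX', 'GENERATOR']
--     """
--     subsystems = []
--
--     for s in sensor_list:
--         subsystem = sensor_map.get(s, "UNKNOWN")
--         subsystems.append(subsystem)
--
--     # Remove duplicates while preserving order
--     subsystems = list(dict.fromkeys(subsystems))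
--     return subsystems
-- ===== SOURCE B (Python) =====
-- def map_sensors_to_subsystems(sensor_list, sensor_map):
--     # Recursive "select head, filter out its duplicates" scheme: emit the first
--     # sensor's subsystem, drop every later sensor mapping to that same subsystem,
--     # and recurse on what remains. No dedup pass and no seen set are needed.
--     if not sensor_list:
--         return []
--     head = sensor_map.get(sensor_list[0], "UNKNOWN")
--     rest = [s for s in sensor_list[1:] if sensor_map.get(s, "UNKNOWN") != head]
--     return [head] + map_sensors_to_subsystems(rest, sensor_map)
-- ===== Notes on version B (the rewrite author's own statement) =====
-- stated objective: alternative
-- what changed: Replaces A's map-then-dict.fromkeys-dedup staging with a recursion that emits the head sensor's subsystem and filters all later sensors mapping to it out of the tail before recursing, so duplicates never enter any intermediate list.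
import Mathlib
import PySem

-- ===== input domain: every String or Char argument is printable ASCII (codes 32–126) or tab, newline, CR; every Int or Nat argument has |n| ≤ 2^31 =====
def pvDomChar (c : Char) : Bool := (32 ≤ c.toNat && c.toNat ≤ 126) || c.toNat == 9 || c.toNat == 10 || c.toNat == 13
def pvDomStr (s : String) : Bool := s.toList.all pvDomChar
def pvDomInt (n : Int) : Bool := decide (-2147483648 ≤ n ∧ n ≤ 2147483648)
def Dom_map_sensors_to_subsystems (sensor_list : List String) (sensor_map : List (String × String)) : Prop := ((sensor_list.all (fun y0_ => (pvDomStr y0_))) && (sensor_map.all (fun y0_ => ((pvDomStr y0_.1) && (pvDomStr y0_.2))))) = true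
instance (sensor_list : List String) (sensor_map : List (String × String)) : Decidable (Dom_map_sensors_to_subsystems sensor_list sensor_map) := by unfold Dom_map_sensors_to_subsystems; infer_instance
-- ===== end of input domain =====

-- B replaces A's map-then-dedup staging with a head-select/filter-tail recursion (alternative decomposition, same results).


-- ===== PORT A =====
-- A: map each sensor through the dict, then dedup with dict.fromkeys (= PySem.List.dedup)
def map_sensors_to_subsystems (sensor_list : List String) (sensor_map : List (String × String)) : List String :=
  let d := PySem.Dict.ofList sensor_map
  let subsystems := sensor_list.foldl (fun acc s => acc ++ [d.getD s "UNKNOWN"]) []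
  PySem.List.dedup subsystems

-- ===== PORT B =====
-- B: emit head sensor's subsystem, filter sensors mapping to it out of the tail, recurse
def map_sensors_to_subsystems_alt (sensor_list : List String) (sensor_map : List (String × String)) : List String :=
  match sensor_list with
  | [] => []
  | s :: rest =>
    let d := PySem.Dict.ofList sensor_map
    let head := d.getD s "UNKNOWN"
    head :: map_sensors_to_subsystems_alt (rest.filter (fun t => d.getD t "UNKNOWN" != head)) sensor_map
termination_by sensor_list.length
decreasing_by
  simpa using Nat.lt_succ_of_le (List.length_filter_le _ _)

-- ===== PRECONDITION & SPEC =====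
def Spec_map_sensors_to_subsystems (sensor_list : List String) (sensor_map : List (String × String)) (out : List String) : Prop := out = map_sensors_to_subsystems_alt sensor_list sensor_map
instance (sensor_list : List String) (sensor_map : List (String × String)) (out : List String) : Decidable (Spec_map_sensors_to_subsystems sensor_list sensor_map out) := by unfold Spec_map_sensors_to_subsystems; infer_instance

-- ===== CLAIM =====
def Claim_equal_map_sensors_to_subsystems : Prop := ∀ (sensor_list : List String) (sensor_map : List (String × String)), Dom_map_sensors_to_subsystems sensor_list sensor_map → Spec_map_sensors_to_subsystems sensor_list sensor_map (map_sensors_to_subsystems sensor_list sensor_map)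

-- ===== LEMMAS AND PROOFS =====

-- A's loop builds exactly the mapped list
theorem pvFoldAppend (f : String → String) (l : List String) (acc : List String) :
    l.foldl (fun acc s => acc ++ [f s]) acc = acc ++ l.map f := by
  induction l generalizing acc with
  | nil => simp
  | cons a t ih => simp [List.foldl, ih]

-- adding elements already-seen x is absorbed: filtering x out of the input does not change the fold
theorem pvFoldAddFilter (xs : List String) (acc : List String) (x : String) (hx : x ∈ acc) :
    List.foldl PySem.Set.add acc xs
      = List.foldl PySem.Set.add acc (xs.filter (fun y => y != x)) := by
  induction xs generalizing acc with
  | nil => rfl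
  | cons a t ih =>
    by_cases h : a = x
    · subst h
      have habs : PySem.Set.add acc a = acc := by
        simp [PySem.Set.add, hx]
      simp [List.foldl, habs, ih acc hx]
    · have hmem : x ∈ PySem.Set.add acc a := by
        simp [PySem.Set.add]; split <;> simp [hx]
      simp [List.foldl, h, ih _ hmem]

-- a head x never seen again can be peeled off the accumulator
theorem pvFoldAddCons (xs : List String) (s : List String) (x : String) (hx : x ∉ xs) :
    List.foldl PySem.Set.add (x :: s) xs = x :: List.foldl PySem.Set.add s xs := by
  induction xs generalizing s with
  | nil => rfl
  | cons a t ih =>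
    have hax : ¬ (a = x) := fun h => hx (h ▸ List.mem_cons_self ..)
    have hxt : x ∉ t := fun h => hx (List.mem_cons_of_mem _ h)
    by_cases hc : s.contains a
    · have hmem : a ∈ s := List.contains_iff_mem.mp hc
      have h1 : PySem.Set.add (x :: s) a = x :: s := by
        simp [PySem.Set.add, hmem]
      have h2 : PySem.Set.add s a = s := by simp [PySem.Set.add, hmem]
      simp [List.foldl, h1, h2, ih s hxt]
    · have hnmem : a ∉ s := fun h => hc (List.contains_iff_mem.mpr h)
      have h1 : PySem.Set.add (x :: s) a = x :: (s ++ [a]) := by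
        simp [PySem.Set.add, hnmem]
        exact fun h => absurd h hax
      have h2 : PySem.Set.add s a = s ++ [a] := by simp [PySem.Set.add, hnmem]
      simp [List.foldl, h1, h2, ih (s ++ [a]) hxt]

-- dedup's recursion equation in B's shape
theorem pvDedupCons (x : String) (xs : List String) :
    PySem.List.dedup (x :: xs) = x :: PySem.List.dedup (xs.filter (fun y => y != x)) := by
  have h1 : PySem.Set.add (PySem.Set.empty : PySem.Set String) x = [x] := rfl
  have hx : x ∉ xs.filter (fun y => y != x) := by
    intro h
    simp [List.mem_filter] at h
  calc PySem.List.dedup (x :: xs)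
      = List.foldl PySem.Set.add [x] xs := by
        simp [PySem.List.dedup, PySem.Set.ofList, List.foldl]
    _ = List.foldl PySem.Set.add [x] (xs.filter (fun y => y != x)) :=
        pvFoldAddFilter xs [x] x (List.mem_singleton.mpr rfl)
    _ = x :: List.foldl PySem.Set.add [] (xs.filter (fun y => y != x)) :=
        pvFoldAddCons _ [] x hx
    _ = x :: PySem.List.dedup (xs.filter (fun y => y != x)) := by
        simp [PySem.List.dedup, PySem.Set.ofList, PySem.Set.empty]

-- map commutes with B's filter
theorem pvMapFilter (f : String → String) (c : String) (l : List String) :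
    (l.filter (fun t => f t != c)).map f = (l.map f).filter (fun y => y != c) := by
  induction l with
  | nil => rfl
  | cons a t ih =>
    by_cases h : f a = c <;> simp [h, ih]

-- B's port returns [] on []
theorem pvAltNil (sm : List (String × String)) : map_sensors_to_subsystems_alt [] sm = [] := by
  rw [map_sensors_to_subsystems_alt]

-- B equals dedup ∘ map, by strong induction on the list length
theorem pvAltEq (n : Nat) : ∀ (l : List String) (sm : List (String × String)), l.length ≤ n →
    map_sensors_to_subsystems_alt l sm
      = PySem.List.dedup (l.map (fun s => (PySem.Dict.ofList sm).getD s "UNKNOWN")) := by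
  induction n with
  | zero =>
    intro l sm hl
    rw [List.length_eq_zero_iff.mp (Nat.le_zero.mp hl), pvAltNil]
    rfl
  | succ n ih =>
    intro l sm hl
    match l with
    | [] => rw [pvAltNil]; rfl
    | s :: rest =>
      rw [map_sensors_to_subsystems_alt]
      simp only [List.map_cons]
      rw [pvDedupCons]
      congr 1
      rw [ih _ sm (le_trans (List.length_filter_le _ _) (Nat.succ_le_succ_iff.mp hl))]
      exact congrArg PySem.List.dedup (pvMapFilter _ _ _)

-- ===== VERDICT =====
theorem map_sensors_to_subsystems_spec : Claim_equal_map_sensors_to_subsystems := by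
  intro sensor_list sensor_map _
  unfold Spec_map_sensors_to_subsystems
  simp only [map_sensors_to_subsystems]
  rw [pvFoldAppend, List.nil_append, pvAltEq sensor_list.length _ _ (le_refl _)]
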